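-- pv_equiv track=rewrite | github.com/mavren-26/Chris-code-54 | 13.py | count_probes
-- ===== SOURCE A (Python) =====
-- def count_probes(arr, n):
--     table = [-1] * n
--     result = []
--
--     for key in arr:
--         idx = key % n
--         start = idx
--         probes = 1
--
--         while table[idx] != -1:
--             idx = (idx + 1) % n
--             probes += 1
--             if idx == start:
--                 break
--
--         table[idx] = key
--         result.append(probes)
--
--     return result
-- ===== SOURCE B (Python) =====
-- def _bisect_left(xs, x):
--     lo, hi = 0, len(xs)
--     while lo < hi:
--         mid = (lo + hi) // 2
--         if xs[mid] < x:
--             lo = mid + 1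
--         else:
--             hi = mid
--     return lo
--
--
-- def count_probes(arr, n):
--     # Keep the sorted list of free slots; each insertion binary-searches for the
--     # first free slot at or after the key's home position (wrapping to the list
--     # head) and reads the probe count off as the cyclic distance to it.
--     free = list(range(n))
--     result = []
--     for key in arr:
--         start = key % n
--         if free:
--             j = _bisect_left(free, start)
--             if j == len(free):
--                 j = 0
--             probes = (free[j] - start) % n + 1
--             free.pop(j)
--         else:
--             probes = n + 1
--         result.append(probes)
--     return result
-- ===== Notes on version B (the rewrite author's own statement) =====
-- stated objective: faster
-- what changed: A walks the hash table slot by slot for every key; B never builds the table: it keeps a sorted list of free slots, binary-searches it for the first free slot at or after the key's hash (wrapping to its head), reads the probe count off as the cyclic distance, and removes that slot from the list. Pre_ excludes arrays containing the key -1, which collides with A's empty-slot sentinel so A treats the freshly inserted key as a still-free slot.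
-- outside the precondition, e.g. on count_probes([-1, 2], 3): A returns [1, 1], B returns [1, 2]; on count_probes([-1, -1], 2): A returns [1, 1], B returns [1, 2]
import Mathlib
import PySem

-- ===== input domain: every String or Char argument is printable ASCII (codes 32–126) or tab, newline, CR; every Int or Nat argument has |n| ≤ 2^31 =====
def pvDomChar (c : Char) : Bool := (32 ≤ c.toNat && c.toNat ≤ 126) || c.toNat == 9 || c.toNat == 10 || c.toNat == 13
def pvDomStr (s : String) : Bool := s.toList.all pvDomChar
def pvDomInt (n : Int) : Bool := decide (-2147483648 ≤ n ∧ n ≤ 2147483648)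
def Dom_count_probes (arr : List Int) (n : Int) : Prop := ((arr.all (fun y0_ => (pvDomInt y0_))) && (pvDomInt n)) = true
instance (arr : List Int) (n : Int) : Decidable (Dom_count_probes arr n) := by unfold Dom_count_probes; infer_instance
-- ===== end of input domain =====

-- B replaces A's per-key linear probe walk over the table (O(n) per insertion) by a sorted
-- free-slot list searched with binary search (probes = cyclic distance to the chosen free slot);
-- the return values are proved equal on Pre_, which keeps the sentinel -1 out of the keys.

-- ===== PORT A =====
-- the 'while table[idx] != -1' loop of A; fuel n.toNat is exactly the loop's maximal
-- iteration count (the break at idx == start fires after at most n steps), so the port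
-- computes precisely what the Python loop computes on every input admitted by Pre_.
def probeA (table : List Int) (n start : Int) : Int → Int → Nat → Int × Int
  | idx, probes, 0 => (idx, probes)
  | idx, probes, fuel+1 =>
      if PySem.List.pyGetD table idx 0 ≠ -1 then
        if PySem.Int.mod (idx + 1) n = start then (PySem.Int.mod (idx + 1) n, probes + 1)
        else probeA table n start (PySem.Int.mod (idx + 1) n) (probes + 1) fuel
      else (idx, probes)

-- the body of A's 'for key in arr' loop
def stepA (n : Int) (st : List Int × List Int) (key : Int) : List Int × List Int :=
  let idx := PySem.Int.mod key n
  let r := probeA st.1 n idx idx 1 n.toNat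
  (PySem.List.pySetD st.1 r.1 key, st.2 ++ [r.2])

def count_probes (arr : List Int) (n : Int) : List Int :=
  (arr.foldl (stepA n) (List.replicate n.toNat (-1), [])).2

-- ===== PORT B =====
-- the body of B's 'for key in arr' loop; Source B's hand-written _bisect_left is verbatim the
-- standard bisect.bisect_left algorithm, ported as the prelude's primitive PySem.List.bisectLeft;
-- free.pop(j) has j in range and the popped value is unused, so it is List.eraseIdx.
def stepB (n : Int) (st : List Int × List Int) (key : Int) : List Int × List Int :=
  let free := st.1
  let start := PySem.Int.mod key n
  if free ≠ [] then
    let j0 := PySem.List.bisectLeft free start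
    let j := if j0 = free.length then 0 else j0
    let probes := PySem.Int.mod (free.getD j 0 - start) n + 1
    (free.eraseIdx j, st.2 ++ [probes])
  else
    (free, st.2 ++ [n + 1])

-- list(range(n)) is empty for n ≤ 0, exactly as PySem.List.pyRange 0 n 1
def count_probes_alt (arr : List Int) (n : Int) : List Int :=
  (arr.foldl (stepB n) (PySem.List.pyRange 0 n 1, [])).2

-- ===== PRECONDITION & SPEC =====
-- Pre_ excludes (a) the inputs where A raises — with arr nonempty and n = 0 'key % n' is a
-- ZeroDivisionError, and with n < 0 the table is empty so 'table[idx]' is an IndexError — and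
-- (b) arrays containing the key -1, which collides with A's empty-slot sentinel: A then treats
-- the freshly inserted key as still-free, a corner no caller storing real keys would rely on.
def Pre_count_probes (arr : List Int) (n : Int) : Prop := (0 < n ∨ arr = []) ∧ (-1 : Int) ∉ arr
instance (arr : List Int) (n : Int) : Decidable (Pre_count_probes arr n) := by
  unfold Pre_count_probes; infer_instance
def pvWitness_count_probes : List Int × Int := ([3, 1, 7, 2, 4], 4)

def Spec_count_probes (arr : List Int) (n : Int) (out : List Int) : Prop := out = count_probes_alt arr n
instance (arr : List Int) (n : Int) (out : List Int) : Decidable (Spec_count_probes arr n out) := by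
  unfold Spec_count_probes; infer_instance

-- ===== CLAIM (what is proved, stated in full; the proofs are below) =====
def Claim_equal_count_probes : Prop := ∀ (arr : List Int) (n : Int), Dom_count_probes arr n → Pre_count_probes arr n → Spec_count_probes arr n (count_probes arr n)

-- ===== LEMMAS AND PROOFS =====

-- the sorted list of free slots of a table (a slot is free iff it holds the sentinel -1)
def freeInv (table : List Int) : List Int :=
  ((List.range table.length).filter (fun i => table.getD i 0 = -1)).map Int.ofNat

theorem freeInv_sorted (table : List Int) : (freeInv table).Pairwise (· < ·) := by
  unfold freeInv
  refine List.pairwise_map.mpr ?_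
  refine List.Pairwise.imp ?_ ((List.pairwise_lt_range).filter _)
  intro a b h; exact Int.ofNat_lt.mpr h

theorem mem_freeInv (table : List Int) (x : Int) :
    x ∈ freeInv table ↔ ∃ i : Nat, i < table.length ∧ table.getD i 0 = -1 ∧ x = (i : Int) := by
  unfold freeInv
  rw [List.mem_map]
  constructor
  · rintro ⟨i, hi, rfl⟩
    rw [List.mem_filter, List.mem_range] at hi
    exact ⟨i, hi.1, by simpa using hi.2, rfl⟩
  · rintro ⟨i, hi, hf, rfl⟩
    exact ⟨i, List.mem_filter.mpr ⟨List.mem_range.mpr hi, by simpa using hf⟩, rfl⟩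

-- A's while loop, walking d occupied slots to a free one
theorem probeA_walk (table : List Int) (n : Int) (s : Nat)
    (N : Nat) (hN : N = table.length) (hn : n = (N : Int)) :
    ∀ (d i : Nat) (p : Int) (fuel : Nat), d ≤ fuel → i < N →
    (∀ j < d, table.getD ((i + j) % N) 0 ≠ -1) →
    table.getD ((i + d) % N) 0 = -1 →
    (∀ j, 0 < j → j ≤ d → (i + j) % N ≠ s) →
    probeA table n (s : Int) (i : Int) p fuel = ((((i + d) % N : Nat) : Int), p + d) := by
  intro d
  induction d with
  | zero =>
    intro i p fuel _ hiN _ hfree _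
    have hii : (i + 0) % N = i := by rw [Nat.add_zero, Nat.mod_eq_of_lt hiN]
    rw [hii] at hfree ⊢
    cases fuel with
    | zero => simp [probeA]
    | succ f =>
      rw [probeA, if_neg (by simpa using hfree)]
      simp
  | succ d ih =>
    intro i p fuel hfuel hiN hocc hfree hns
    obtain ⟨f, rfl⟩ : ∃ f, fuel = f + 1 := ⟨fuel - 1, by omega⟩
    have hocc0 : table.getD i 0 ≠ -1 := by
      have := hocc 0 (by omega)
      rwa [Nat.add_zero, Nat.mod_eq_of_lt hiN] at this
    have hmod : PySem.Int.mod ((i : Int) + 1) n = (((i + 1) % N : Nat) : Int) := by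
      rw [hn]
      exact_mod_cast PySem.Int.mod_natCast (i + 1) N
    have hne : ((i + 1) % N) ≠ s := by
      have := hns 1 one_pos (by omega); rwa [] at this
    rw [probeA, if_pos (by simpa using hocc0), hmod, if_neg (by exact_mod_cast hne)]
    have hstep := ih ((i + 1) % N) (p + 1) f (by omega) (Nat.mod_lt _ (by omega))
      (fun j hj => by
        rw [Nat.mod_add_mod, show i + 1 + j = i + (j + 1) from by omega]
        exact hocc (j + 1) (by omega))
      (by rw [Nat.mod_add_mod, show i + 1 + d = i + (d + 1) from by omega]; exact hfree)
      (fun j hj hjd => by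
        rw [Nat.mod_add_mod, show i + 1 + j = i + (j + 1) from by omega]
        exact hns (j + 1) (by omega) (by omega))
    rw [hstep, Nat.mod_add_mod, show i + 1 + d = i + (d + 1) from by omega,
      Prod.mk.injEq]
    exact ⟨rfl, by push_cast; ring⟩

-- A's while loop on a full table: n steps then the break at idx == start
theorem probeA_break (table : List Int) (n : Int) (s : Nat)
    (N : Nat) (hN : N = table.length) (hn : n = (N : Int)) :
    ∀ (d i : Nat) (p : Int) (fuel : Nat), d < fuel → i < N →
    (∀ j, j ≤ d → table.getD ((i + j) % N) 0 ≠ -1) →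
    ((i + d + 1) % N = s) →
    (∀ j, 0 < j → j ≤ d → (i + j) % N ≠ s) →
    probeA table n (s : Int) (i : Int) p fuel = ((s : Int), p + d + 1) := by
  intro d
  induction d with
  | zero =>
    intro i p fuel hfuel hiN hocc hbrk _
    obtain ⟨f, rfl⟩ : ∃ f, fuel = f + 1 := ⟨fuel - 1, by omega⟩
    have hocc0 : table.getD i 0 ≠ -1 := by
      have := hocc 0 (by omega)
      rwa [Nat.add_zero, Nat.mod_eq_of_lt hiN] at this
    have hmod : PySem.Int.mod ((i : Int) + 1) n = (((i + 1) % N : Nat) : Int) := by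
      rw [hn]
      exact_mod_cast PySem.Int.mod_natCast (i + 1) N
    rw [Nat.add_zero] at hbrk
    rw [probeA, if_pos (by simpa using hocc0), hmod, hbrk, if_pos rfl]
    simp
  | succ d ih =>
    intro i p fuel hfuel hiN hocc hbrk hns
    obtain ⟨f, rfl⟩ : ∃ f, fuel = f + 1 := ⟨fuel - 1, by omega⟩
    have hocc0 : table.getD i 0 ≠ -1 := by
      have := hocc 0 (by omega)
      rwa [Nat.add_zero, Nat.mod_eq_of_lt hiN] at this
    have hmod : PySem.Int.mod ((i : Int) + 1) n = (((i + 1) % N : Nat) : Int) := by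
      rw [hn]
      exact_mod_cast PySem.Int.mod_natCast (i + 1) N
    have hne : ((i + 1) % N) ≠ s := by
      have := hns 1 one_pos (by omega); rwa [] at this
    rw [probeA, if_pos (by simpa using hocc0), hmod, if_neg (by exact_mod_cast hne)]
    have hstep := ih ((i + 1) % N) (p + 1) f (by omega) (Nat.mod_lt _ (by omega))
      (fun j hj => by
        rw [Nat.mod_add_mod, show i + 1 + j = i + (j + 1) from by omega]
        exact hocc (j + 1) (by omega))
      (by
        rw [Nat.add_assoc, Nat.mod_add_mod]
        rwa [show i + 1 + (d + 1) = i + (d + 1) + 1 from by omega])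
      (fun j hj hjd => by
        rw [Nat.mod_add_mod, show i + 1 + j = i + (j + 1) from by omega]
        exact hns (j + 1) (by omega) (by omega))
    rw [hstep, Prod.mk.injEq]
    exact ⟨rfl, by push_cast; ring⟩


theorem mod_window (s j N : Nat) (hs : s < N) (hj0 : 0 < j) (hjN : j < N) :
    (s + j) % N ≠ s := by
  rcases Nat.lt_or_ge (s + j) N with h | h
  · rw [Nat.mod_eq_of_lt h]; omega
  · rw [Nat.mod_eq_sub_mod h, Nat.mod_eq_of_lt (by omega)]; omega

theorem freeInv_nil_iff (table : List Int) :
    freeInv table = [] ↔ ∀ i < table.length, table.getD i 0 ≠ -1 := by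
  unfold freeInv
  rw [List.map_eq_nil_iff, List.filter_eq_nil_iff]
  constructor
  · intro h i hi hf; exact h i (List.mem_range.mpr hi) (by simpa using hf)
  · intro h i hi hf; exact h i (List.mem_range.mp hi) (by simpa using hf)

theorem eraseIdx_eq_filter_of_sorted (l : List Int) (hl : l.Pairwise (· < ·)) (j : Nat)
    (hj : j < l.length) : l.eraseIdx j = l.filter (fun x => x ≠ l[j]) := by
  have hnd : l.Nodup := hl.imp ne_of_lt
  rw [← List.erase_eq_eraseIdx_of_idxOf (List.Nodup.idxOf_getElem hnd j hj),
    hnd.erase_eq_filter]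
  apply List.filter_congr
  intro x _
  rw [Bool.eq_iff_iff]; simp

theorem freeInv_set (table : List Int) (t : Nat) (ht : t < table.length) (v : Int) :
    freeInv (table.set t v)
      = ((List.range table.length).filter
          (fun i => (if t = i then v else table.getD i 0) = -1)).map Int.ofNat := by
  unfold freeInv
  rw [List.length_set]
  congr 1
  apply List.filter_congr
  intro i hi
  rw [List.mem_range] at hi
  congr 1
  rw [List.getD_eq_getElem?_getD, List.getD_eq_getElem?_getD, List.getElem?_set]
  split_ifs with h
  · simp
  · rfl

theorem freeInv_set_filter (table : List Int) (t : Nat) (ht : t < table.length) (v : Int)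
    (hv : v ≠ -1) :
    freeInv (table.set t v) = (freeInv table).filter (fun x => x ≠ (t : Int)) := by
  rw [freeInv_set table t ht v]
  unfold freeInv
  rw [List.filter_map, List.filter_filter]
  congr 1
  apply List.filter_congr
  intro i hi
  rw [Bool.eq_iff_iff]
  simp only [Function.comp, decide_eq_true_eq, Bool.and_eq_true]
  constructor
  · intro h
    split_ifs at h with he
    · exact absurd h hv
    · exact ⟨by simpa [Int.ofNat_eq_natCast, Ne, Int.natCast_inj] using (Ne.symm he), by simpa using h⟩
  · rintro ⟨h2, h1⟩
    rw [if_neg (fun he => (by simpa [Int.ofNat_eq_natCast] using h2 : ¬ i = t) he.symm)]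
    simpa using h1

-- B's chosen free slot is exactly the slot A's walk stops at: the Nat.find of the
-- first free offset from the hash position, and B's modular distance is that offset.
theorem select_spec (table : List Int) (n : Int) (sN N : Nat) (hN : N = table.length)
    (hn : n = (N : Int)) (hsN : sN < N) (hne : freeInv table ≠ [])
    (H : ∃ j, table.getD ((sN + j) % N) 0 = -1) (j0 j : Nat)
    (hj0 : j0 = PySem.List.bisectLeft (freeInv table) ((sN : Nat) : Int))
    (hj : j = if j0 = (freeInv table).length then 0 else j0) :
    j < (freeInv table).length ∧
    (freeInv table).getD j 0 = (((sN + Nat.find H) % N : Nat) : Int) ∧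
    PySem.Int.mod ((freeInv table).getD j 0 - ((sN : Nat) : Int)) n
      = ((Nat.find H : Nat) : Int) ∧
    Nat.find H < N := by
  have hord : (freeInv table).Pairwise (· ≤ ·) := (freeInv_sorted table).imp le_of_lt
  obtain ⟨hble, hlt, hge⟩ := PySem.List.bisectLeft_spec (freeInv table) ((sN : Nat) : Int) hord
  rw [← hj0] at hble hlt hge
  have hmono : ∀ (k1 k2 : Nat) (h1 : k1 < (freeInv table).length) (h2 : k2 < (freeInv table).length),
      k1 ≤ k2 → (freeInv table)[k1] ≤ (freeInv table)[k2] := by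
    intro k1 k2 h1 h2 hk
    rcases Nat.lt_or_ge k1 k2 with h | h
    · exact le_of_lt ((List.pairwise_iff_getElem.mp (freeInv_sorted table)) k1 k2 h1 h2 h)
    · have : k1 = k2 := by omega
      subst this; rfl
  have hNpos : 0 < N := by omega
  rcases Nat.lt_or_ge j0 (freeInv table).length with hcase | hcase
  · -- some free slot ≥ sN exists; target is the least of them
    have hj' : j = j0 := by rw [hj, if_neg (by omega)]
    subst hj'
    obtain ⟨m, hmlen, hmfree, htm⟩ := (mem_freeInv table _).mp (List.getElem_mem hcase)
    have hmN : m < N := by omega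
    have hsm : sN ≤ m := by
      have := hge j hcase le_rfl
      rw [htm] at this
      exact_mod_cast this
    have hminm : ∀ i, i < N → table.getD i 0 = -1 → sN ≤ i → m ≤ i := by
      intro i hiN hif hsi
      have hmem : ((i : Nat) : Int) ∈ freeInv table :=
        (mem_freeInv table _).mpr ⟨i, by omega, hif, rfl⟩
      obtain ⟨k, hk, hik⟩ := List.mem_iff_getElem.mp hmem
      rcases Nat.lt_or_ge k j with hkj | hkj
      · have := hlt k hk hkj
        rw [hik] at this
        have : i < sN := by exact_mod_cast this
        omega
      · have := hmono j k hcase hk hkj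
        rw [htm, hik] at this
        exact_mod_cast this
    have hdm : Nat.find H = m - sN := by
      rw [Nat.find_eq_iff]
      constructor
      · rw [show sN + (m - sN) = m from by omega, Nat.mod_eq_of_lt hmN]
        exact hmfree
      · intro jj hjj hfree
        rw [Nat.mod_eq_of_lt (by omega)] at hfree
        have := hminm (sN + jj) (by omega) hfree (by omega)
        omega
    have htar : (freeInv table).getD j 0 = ((m : Nat) : Int) := by
      rw [List.getD_eq_getElem _ _ hcase, htm]
    refine ⟨hcase, ?_, ?_, by omega⟩
    · rw [htar, hdm, show sN + (m - sN) = m from by omega, Nat.mod_eq_of_lt hmN]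
    · rw [htar, hdm]
      have hcast : ((m : Nat) : Int) - ((sN : Nat) : Int) = ((m - sN : Nat) : Int) := by omega
      rw [hcast, PySem.Int.mod_eq_emod_of_pos (by omega),
        Int.emod_eq_of_lt (by omega) (by omega)]
  · -- every free slot is < sN; wrap around to the smallest free slot
    have hj0len : j0 = (freeInv table).length := by omega
    have hlen0 : 0 < (freeInv table).length := List.length_pos_iff.mpr hne
    have hj' : j = 0 := by rw [hj, if_pos hj0len]
    subst hj'
    obtain ⟨t0, ht0len, ht0free, htt0⟩ := (mem_freeInv table _).mp (List.getElem_mem hlen0)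
    have ht0N : t0 < N := by omega
    have halllt : ∀ i, i < N → table.getD i 0 = -1 → i < sN := by
      intro i hiN hif
      have hmem : ((i : Nat) : Int) ∈ freeInv table :=
        (mem_freeInv table _).mpr ⟨i, by omega, hif, rfl⟩
      obtain ⟨k, hk, hik⟩ := List.mem_iff_getElem.mp hmem
      have := hlt k hk (by omega)
      rw [hik] at this
      exact_mod_cast this
    have ht0s : t0 < sN := halllt t0 ht0N ht0free
    have ht0min : ∀ i, i < N → table.getD i 0 = -1 → t0 ≤ i := by
      intro i hiN hif
      have hmem : ((i : Nat) : Int) ∈ freeInv table :=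
        (mem_freeInv table _).mpr ⟨i, by omega, hif, rfl⟩
      obtain ⟨k, hk, hik⟩ := List.mem_iff_getElem.mp hmem
      have := hmono 0 k hlen0 hk (by omega)
      rw [htt0, hik] at this
      exact_mod_cast this
    have hdm : Nat.find H = N - sN + t0 := by
      rw [Nat.find_eq_iff]
      constructor
      · rw [show sN + (N - sN + t0) = N + t0 from by omega, Nat.add_mod_left,
          Nat.mod_eq_of_lt ht0N]
        exact ht0free
      · intro jj hjj hfree
        rcases Nat.lt_or_ge jj (N - sN) with hc | hc
        · rw [Nat.mod_eq_of_lt (by omega)] at hfree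
          have := halllt (sN + jj) (by omega) hfree
          omega
        · rw [show sN + jj = N + (jj - (N - sN)) from by omega, Nat.add_mod_left,
            Nat.mod_eq_of_lt (by omega)] at hfree
          have := ht0min (jj - (N - sN)) (by omega) hfree
          omega
    have htar : (freeInv table).getD 0 0 = ((t0 : Nat) : Int) := by
      rw [List.getD_eq_getElem _ _ hlen0, htt0]
    refine ⟨hlen0, ?_, ?_, by omega⟩
    · rw [htar, hdm, show sN + (N - sN + t0) = N + t0 from by omega, Nat.add_mod_left,
        Nat.mod_eq_of_lt ht0N]
    · rw [htar, hdm]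
      rw [PySem.Int.mod_eq_emod_of_pos (by omega)]
      rw [show ((t0 : Nat) : Int) - ((sN : Nat) : Int)
          = ((N - sN + t0 : Nat) : Int) - ((N : Nat) : Int) from by omega]
      rw [hn, Int.sub_emod_right, Int.emod_eq_of_lt (by omega) (by omega)]

-- one loop iteration of A and of B, from related states: equal probe counts always,
-- and the states stay related whenever the inserted key is not A's sentinel -1
theorem step_eq (n : Int) (hn : 0 < n) (table res : List Int) (key : Int)
    (hlen : table.length = n.toNat) :
    (stepA n (table, res) key).1.length = n.toNat ∧
    (stepA n (table, res) key).2 = (stepB n (freeInv table, res) key).2 ∧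
    (key ≠ -1 → freeInv (stepA n (table, res) key).1 = (stepB n (freeInv table, res) key).1) := by
  have hn0 : (0:Int) < n := hn
  set N := n.toNat with hNdef
  have hN : N = table.length := hlen.symm
  have hn' : n = (N : Int) := by omega
  have hNpos : 0 < N := by omega
  set s := PySem.Int.mod key n with hsdef
  have hs0 : (0:Int) ≤ s := PySem.Int.mod_nonneg key hn0
  have hsn : s < n := PySem.Int.mod_lt key hn0
  have hseq : s = ((s.toNat : Nat) : Int) := (Int.toNat_of_nonneg hs0).symm
  set sN := s.toNat with hsNdef
  have hsN : sN < N := by omega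
  by_cases hfe : freeInv table = []
  · -- the table is full: A walks all n slots and breaks; B sees an empty free list
    have hfull : ∀ i < table.length, table.getD i 0 ≠ -1 := (freeInv_nil_iff table).mp hfe
    have hwalk := probeA_break table n sN N hN hn' (N - 1) sN 1 N (by omega) hsN
      (fun j _ => hfull ((sN + j) % N) (by rw [← hN]; exact Nat.mod_lt _ hNpos))
      (by rw [show sN + (N - 1) + 1 = sN + N from by omega, Nat.add_mod_right,
        Nat.mod_eq_of_lt hsN])
      (fun j hj0 hjd => mod_window sN j N hsN hj0 (by omega))
    simp only [stepA, stepB, ← hsdef, hseq, ← hNdef, hwalk, hfe]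
    have hset : PySem.List.pySetD table ((sN : Nat) : Int) key = table.set sN key := by
      simp
    rw [hset, if_neg (fun h : ([] : List Int) ≠ [] => h rfl)]
    refine ⟨by simp [← hN], ?_, ?_⟩
    · show res ++ [1 + ((N - 1 : Nat) : Int) + 1] = res ++ [n + 1]
      have : (1:Int) + ((N - 1 : Nat) : Int) + 1 = n + 1 := by omega
      rw [this]
    · intro hk
      show freeInv (table.set sN key) = []
      rw [freeInv_set_filter table sN (by omega) key hk, hfe]
      simp
  · -- some slot is free: A stops at the first free slot cyclically from the hash,
    -- B picks the same slot from the sorted free list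
    have H : ∃ j, table.getD ((sN + j) % N) 0 = -1 := by
      obtain ⟨x, hx⟩ := List.exists_mem_of_ne_nil _ hfe
      obtain ⟨t, htlen, htfree, rfl⟩ := (mem_freeInv table x).mp hx
      refine ⟨(t + N - sN) % N, ?_⟩
      have htN : t < N := by omega
      have h1 : (sN + (t + N - sN) % N) % N = t := by
        calc (sN + (t + N - sN) % N) % N
            = (sN % N + (t + N - sN) % N) % N := by rw [Nat.mod_eq_of_lt hsN]
          _ = (sN + (t + N - sN)) % N := (Nat.add_mod _ _ _).symm
          _ = (t + N) % N := by rw [show sN + (t + N - sN) = t + N from by omega]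
          _ = t := by rw [Nat.add_mod_right, Nat.mod_eq_of_lt htN]
      rw [h1]
      exact htfree
    set d := Nat.find H with hddef
    have hocc : ∀ j < d, table.getD ((sN + j) % N) 0 ≠ -1 := fun j hj => Nat.find_min H hj
    have hfree' : table.getD ((sN + d) % N) 0 = -1 := Nat.find_spec H
    obtain ⟨hjlen, htarg, hmod, hdN⟩ := select_spec table n sN N hN hn' hsN hfe H _ _ rfl rfl
    have hwalk := probeA_walk table n sN N hN hn' d sN 1 N (le_of_lt hdN) hsN hocc hfree'
      (fun j hj0 hjd => mod_window sN j N hsN hj0 (by omega))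
    have htN : (sN + d) % N < N := Nat.mod_lt _ hNpos
    simp only [stepA, stepB, ← hsdef, hseq, ← hNdef, hwalk, if_pos hfe]
    have hset : PySem.List.pySetD table ((((sN + d) % N : Nat)) : Int) key
        = table.set ((sN + d) % N) key := by rw [PySem.List.pySetD_natCast]
    rw [hset]
    refine ⟨by simp [← hN], ?_, ?_⟩
    · rw [hmod, show (1 : Int) + ((d : Nat) : Int) = ((d : Nat) : Int) + 1 from by ring]
    · intro hk
      rw [eraseIdx_eq_filter_of_sorted (freeInv table) (freeInv_sorted table) _ hjlen,
        show (freeInv table)[(if PySem.List.bisectLeft (freeInv table) ((sN : Nat) : Int)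
            = (freeInv table).length then 0
          else PySem.List.bisectLeft (freeInv table) ((sN : Nat) : Int))]
          = ((((sN + d) % N : Nat)) : Int)
          from (List.getD_eq_getElem _ _ hjlen).symm.trans htarg]
      exact freeInv_set_filter table _ (by omega) key hk

theorem fold_eq (n : Int) (hn : 0 < n) :
    ∀ (arr table res : List Int), table.length = n.toNat →
    (∀ k ∈ arr.dropLast, k ≠ -1) →
    (arr.foldl (stepA n) (table, res)).2 = (arr.foldl (stepB n) (freeInv table, res)).2 := by
  intro arr
  induction arr with
  | nil => intro table res _ _; rfl
  | cons key tl ih =>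
    intro table res hlen hno
    obtain ⟨h1, h2, h3⟩ := step_eq n hn table res key hlen
    cases tl with
    | nil =>
      simpa only [List.foldl_cons, List.foldl_nil] using h2
    | cons b t =>
      have hkey : key ≠ -1 := hno key (by simp)
      have hno' : ∀ k ∈ (b :: t).dropLast, k ≠ -1 := by
        intro k hk
        exact hno k (by rw [List.dropLast_cons₂]; exact List.mem_cons_of_mem _ hk)
      have hB : stepB n (freeInv table, res) key
          = (freeInv (stepA n (table, res) key).1, (stepA n (table, res) key).2) := by
        rw [h3 hkey, h2]
      show (List.foldl (stepA n) (stepA n (table, res) key) (b :: t)).2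
          = (List.foldl (stepB n) (stepB n (freeInv table, res) key) (b :: t)).2
      rw [hB]
      exact ih (stepA n (table, res) key).1 (stepA n (table, res) key).2 h1 hno'

-- ===== VERDICT (by name: the statements are the Claim_ definitions above) =====
theorem count_probes_spec : Claim_equal_count_probes := by
  intro arr n _ hpre
  obtain ⟨hpre, hmem⟩ := hpre
  unfold Spec_count_probes count_probes count_probes_alt
  have hno : ∀ k ∈ arr.dropLast, k ≠ -1 := by
    intro k hk he
    exact hmem (he ▸ List.dropLast_subset arr hk)
  rcases hpre with hn | rfl
  · have h0 : freeInv (List.replicate n.toNat (-1)) = PySem.List.pyRange 0 n 1 := by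
      rw [PySem.List.pyRange_one]
      unfold freeInv
      have h2 : ∀ i ∈ List.range n.toNat, (List.replicate n.toNat (-1:Int))[i]?.getD 0 = -1 := by
        intro i hi; rw [List.mem_range] at hi; simp [hi]
      rw [show (List.replicate n.toNat (-1:Int)).length = n.toNat by simp] at *
      rw [List.filter_eq_self.mpr (by intro i hi; simpa using h2 i hi)]
      simp [Int.ofNat_eq_natCast]
    rw [← h0]
    exact fold_eq n hn arr _ [] (by simp) hno
  · simp
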